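-- pv_equiv track=rewrite | github.com/JacksonDonaldson/euler | euler/71-80/72.py | getRemovalPattern
-- ===== SOURCE A (Python) =====
-- import math
-- from functools import reduce
--
-- def getRemovalPattern(removals):
--     pattern = [0] * reduce(math.lcm, removals)
--     for num in removals:
--         i = 1
--         while num * i <= len(pattern):
--             pattern[num * i-1] = 1
--             i+=1
--     return pattern
-- ===== SOURCE B (Python) =====
-- import math
-- from functools import reduce
--
-- def getRemovalPattern(removals):
--     L = reduce(math.lcm, removals)
--     pattern = [0] * L
--     for num in removals:
--         pattern[num - 1 :: num] = [1] * (L // num)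
--     return pattern
-- ===== Notes on version B (the rewrite author's own statement) =====
-- stated objective: idiomatic
-- what changed: Replaces A's inner while-loop that writes pattern[num*i-1] one index at a time with a single bulk slice assignment per removal (pattern[num-1::num] = a run of L//num ones), removing the inner loop and its index arithmetic.
import Mathlib
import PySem

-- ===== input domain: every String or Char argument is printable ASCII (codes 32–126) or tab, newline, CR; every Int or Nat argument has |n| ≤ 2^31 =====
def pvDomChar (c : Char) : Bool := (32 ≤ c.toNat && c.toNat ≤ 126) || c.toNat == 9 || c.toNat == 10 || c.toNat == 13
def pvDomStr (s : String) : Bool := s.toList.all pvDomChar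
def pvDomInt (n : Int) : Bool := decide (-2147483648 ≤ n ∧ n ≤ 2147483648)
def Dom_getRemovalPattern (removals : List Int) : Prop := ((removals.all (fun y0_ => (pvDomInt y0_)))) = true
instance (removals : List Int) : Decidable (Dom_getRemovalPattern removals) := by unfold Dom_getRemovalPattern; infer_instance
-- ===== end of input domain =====

-- B replaces A's inner while-loop of single-index writes with one bulk slice assignment per removal (idiomatic; same cost).

-- reduce(math.lcm, removals): shared by both Pythons verbatim (Python raises TypeError on the empty list; excluded by Pre_)
def pvReduceLcm (removals : List Int) : Int :=
  match removals with
  | [] => 0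
  | h :: t => t.foldl (fun a b => (Int.lcm a b : Int)) h

-- ===== PORT A =====
-- the inner 'while num * i <= len(pattern)' loop; fuel = pattern.length bounds the iterations
-- whenever num ≥ 1 (inside Pre_); exact there, per-step index write via pySetD (Python index semantics)
def pvMarkLoop (num : Int) (pattern : List Int) (i : Int) : Nat → List Int
  | 0 => pattern
  | Nat.succ f =>
    if num * i ≤ (pattern.length : Int) then
      pvMarkLoop num (PySem.List.pySetD pattern (num * i - 1) 1) (i + 1) f
    else pattern

def getRemovalPattern (removals : List Int) : List Int :=
  let pattern := PySem.List.pyRepeat [(0 : Int)] (pvReduceLcm removals)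
  removals.foldl (fun p num => pvMarkLoop num p 1 p.length) pattern

-- ===== PORT B =====
-- indices of the slice xs[start::step] on a list of length len (CPython slice semantics)
def pvSliceIdx (len start step : Int) : List Int :=
  if 0 < step then
    let s0 := if start < 0 then start + len else start
    PySem.List.pyRange (max s0 0) len step
  else if step < 0 then
    let s0 := if start < 0 then start + len else start
    PySem.List.pyRange (min s0 (len - 1)) (-1) step
  else []   -- step = 0: Python raises ValueError before writing anything; outside Pre_

-- xs[start::step] = vs (extended-slice assignment): Python raises ValueError when the lengths
-- differ (step ≠ 1 here); those inputs are outside Pre_ and the total form leaves xs unchanged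
def pvAssignSlice (xs : List Int) (start step : Int) (vs : List Int) : List Int :=
  let idx := pvSliceIdx (xs.length : Int) start step
  if idx.length = vs.length then
    (idx.zip vs).foldl (fun p kv => p.set kv.1.toNat kv.2) xs
  else xs

def getRemovalPattern_alt (removals : List Int) : List Int :=
  match removals with
  | [] => []   -- reduce raises on the empty list in Python; excluded by Pre_
  | _ :: _ =>
    let L := pvReduceLcm removals
    let pattern := PySem.List.pyRepeat [(0 : Int)] L
    removals.foldl (fun p num =>
      pvAssignSlice p (num - 1) num
        (PySem.List.pyRepeat [(1 : Int)] (PySem.Int.floordiv L num))) pattern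

-- ===== PRECONDITION & SPEC =====
-- Pre_ excludes the empty list (reduce raises TypeError) and lists containing a number ≤ 0,
-- on which A's while loop raises IndexError (empty pattern or negative indices walking off the array).
def Pre_getRemovalPattern (removals : List Int) : Prop :=
  removals ≠ [] ∧ ∀ x ∈ removals, 1 ≤ x
instance (removals : List Int) : Decidable (Pre_getRemovalPattern removals) := by
  unfold Pre_getRemovalPattern; infer_instance

def pvWitness_getRemovalPattern : List Int := [2, 3]

def Spec_getRemovalPattern (removals : List Int) (out : List Int) : Prop :=
  out = getRemovalPattern_alt removals
instance (removals : List Int) (out : List Int) : Decidable (Spec_getRemovalPattern removals out) := by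
  unfold Spec_getRemovalPattern; infer_instance

-- ===== CLAIM (what is proved, stated in full; the proofs are below) =====
def Claim_equal_getRemovalPattern : Prop := ∀ (removals : List Int), Dom_getRemovalPattern removals → Pre_getRemovalPattern removals → Spec_getRemovalPattern removals (getRemovalPattern removals)
-- ===== LEMMAS AND PROOFS =====

theorem pvMarkLoop_length (num : Int) (fuel : Nat) (pattern : List Int) (i : Int) :
    (pvMarkLoop num pattern i fuel).length = pattern.length := by
  induction fuel generalizing pattern i with
  | zero => rfl
  | succ f ih =>
    simp only [pvMarkLoop]
    split
    · rw [ih, PySem.List.length_pySetD]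
    · rfl

theorem pvMarkLoop_getElem? (num : Int) (hnum : 1 ≤ num) (fuel : Nat) :
    ∀ (pattern : List Int) (i : Int), 1 ≤ i →
    ((pattern.length : Int) < num * (i + fuel)) → ∀ (j : Nat),
    (pvMarkLoop num pattern i fuel)[j]? =
      if num ∣ (j : Int) + 1 ∧ num * i ≤ (j : Int) + 1 ∧ j < pattern.length then some 1
      else pattern[j]? := by
  induction fuel with
  | zero =>
    intro pattern i hi hlen j
    rw [if_neg]
    · rfl
    rintro ⟨_, hle, hj⟩
    simp only [Nat.cast_zero, add_zero] at hlen
    omega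
  | succ f ih =>
    intro pattern i hi hlen j
    push_cast at hlen
    rw [show num * (i + ((f : Int) + 1)) = num * (i + 1 + (f : Int)) from by ring] at hlen
    simp only [pvMarkLoop]
    split
    · rename_i hcond
      have hpos : 1 ≤ num * i := by nlinarith
      have hrange : (0:Int) ≤ num * i - 1 := by omega
      have hset : PySem.List.pySetD pattern (num * i - 1) 1 =
          pattern.set (num * i - 1).toNat 1 := PySem.List.pySetD_of_nonneg pattern 1 hrange
      rw [hset, ih _ (i + 1) (by omega) (by rw [List.length_set]; omega) j]
      simp only [List.length_set]
      have hexp : num * (i + 1) = num * i + num := by ring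
      by_cases hhit : num * i = (j : Int) + 1
      · -- position j is exactly the one written this step
        have hjlt : j < pattern.length := by omega
        have htn : (num * i - 1).toNat = j := by omega
        rw [if_neg (fun hc => by have := hc.2.1; omega)]
        rw [if_pos ⟨⟨i, by omega⟩, by omega, hjlt⟩, htn]
        simp [hjlt]
      · -- this step writes elsewhere
        have hne : (num * i - 1).toNat ≠ j := by omega
        have hset2 : (pattern.set (num * i - 1).toNat 1)[j]? = pattern[j]? := by
          rw [List.getElem?_set, if_neg hne]
        rw [hset2]
        have hcondiff : (num ∣ (j : Int) + 1 ∧ num * (i + 1) ≤ (j : Int) + 1 ∧ j < pattern.length)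
            ↔ (num ∣ (j : Int) + 1 ∧ num * i ≤ (j : Int) + 1 ∧ j < pattern.length) := by
          constructor
          · rintro ⟨hd, h1, h2⟩; exact ⟨hd, by omega, h2⟩
          · rintro ⟨⟨c, hc⟩, h1, h2⟩
            refine ⟨⟨c, hc⟩, ?_, h2⟩
            have hic : i < c := by
              have h1' : num * i < num * c := by omega
              exact lt_of_mul_lt_mul_left (by omega) (by omega)
            have : num * (i + 1) ≤ num * c :=
              mul_le_mul_of_nonneg_left (by omega) (by omega)
            omega
        simp only [hcondiff]
    · rename_i hcond
      rw [if_neg]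
      rintro ⟨hd, hle, hj⟩
      omega

theorem pvFold_getElem? (rs : List Int) :
    ∀ (p : List Int) (j : Nat), (∀ n ∈ rs, 1 ≤ n) →
    (rs.foldl (fun p num => pvMarkLoop num p 1 p.length) p)[j]? =
      if (∃ n ∈ rs, n ∣ (j : Int) + 1) ∧ j < p.length then some 1 else p[j]? := by
  induction rs with
  | nil => intro p j _; simp
  | cons num t ih =>
    intro p j hrs
    have hnum : 1 ≤ num := hrs num (by simp)
    simp only [List.foldl_cons]
    rw [ih _ j (fun n hn => hrs n (by simp [hn])), pvMarkLoop_length,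
      pvMarkLoop_getElem? num hnum p.length p 1 le_rfl (by nlinarith) j]
    have hmul : ∀ h : num ∣ (j : Int) + 1, num * 1 ≤ (j : Int) + 1 := by
      intro h
      have := Int.le_of_dvd (by omega) h
      omega
    by_cases hd : num ∣ (j : Int) + 1
    · by_cases hj : j < p.length
      · rw [if_pos (show (∃ n ∈ num :: t, n ∣ (j : Int) + 1) ∧ j < p.length from
          ⟨⟨num, by simp, hd⟩, hj⟩)]
        split
        · rfl
        · exact if_pos ⟨hd, hmul hd, hj⟩
      · simp [hj]
    · by_cases ht : ∃ n ∈ t, n ∣ (j : Int) + 1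
      · simp [hd, ht]
      · simp [hd, ht]

-- reduce(math.lcm, h::t) is ≥ 1 and a common multiple of every element, when all are ≥ 1
theorem pvReduceLcm_facts (t : List Int) :
    ∀ acc : Int, 1 ≤ acc → (∀ n ∈ t, 1 ≤ n) →
    1 ≤ t.foldl (fun a b => (Int.lcm a b : Int)) acc ∧
    acc ∣ t.foldl (fun a b => (Int.lcm a b : Int)) acc ∧
    ∀ n ∈ t, n ∣ t.foldl (fun a b => (Int.lcm a b : Int)) acc := by
  induction t with
  | nil =>
    intro acc h _
    exact ⟨h, dvd_refl acc, by simp⟩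
  | cons b t ih =>
    intro acc hacc hall
    have hb : 1 ≤ b := hall b (by simp)
    have hlcm1 : 1 ≤ (Int.lcm acc b : Int) := by
      rcases Nat.eq_zero_or_pos (Int.lcm acc b) with h0 | h0
      · exfalso; rcases Int.lcm_eq_zero_iff.mp h0 with h | h <;> omega
      · exact_mod_cast h0
    simp only [List.foldl_cons]
    obtain ⟨h1, h2, h3⟩ := ih (Int.lcm acc b : Int) hlcm1 (fun n hn => hall n (by simp [hn]))
    refine ⟨h1, dvd_trans (Int.dvd_lcm_left acc b) h2, ?_⟩
    intro n hn
    rcases List.mem_cons.mp hn with rfl | hn'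
    · exact dvd_trans (Int.dvd_lcm_right acc n) h2
    · exact h3 n hn'

theorem pvZipRep (l : List Int) :
    ∀ n : Nat, l.length = n → l.zip (List.replicate n (1 : Int)) = l.map (fun i => (i, (1 : Int))) := by
  induction l with
  | nil => intro n _; simp
  | cons a l ih =>
    intro n h
    cases n with
    | zero => simp at h
    | succ m => simp [List.replicate_succ, ih m (by simpa using h)]

theorem pvSetFold_getElem? (l : List Int) :
    ∀ (xs : List Int) (j : Nat), (∀ i ∈ l, 0 ≤ i) →
    (l.foldl (fun p i => p.set i.toNat (1 : Int)) xs)[j]? =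
      if ((j : Int) ∈ l) ∧ j < xs.length then some 1 else xs[j]? := by
  induction l with
  | nil => intro xs j _; simp
  | cons a l ih =>
    intro xs j hpos
    have ha : 0 ≤ a := hpos a (by simp)
    simp only [List.foldl_cons]
    rw [ih _ j (fun i hi => hpos i (by simp [hi])), List.length_set]
    by_cases hj : j < xs.length
    · by_cases hal : ((j : Int)) ∈ l
      · rw [if_pos (show ((j : Int) ∈ l) ∧ j < xs.length from ⟨hal, hj⟩),
          if_pos (show ((j : Int) ∈ a :: l) ∧ j < xs.length from ⟨by simp [hal], hj⟩)]
      · rw [if_neg (by rintro ⟨h1, _⟩; exact hal h1), List.getElem?_set]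
        by_cases hae : a.toNat = j
        · have haj : a = (j : Int) := by omega
          rw [if_pos hae, if_pos (by omega : a.toNat < xs.length),
            if_pos (show ((j : Int) ∈ a :: l) ∧ j < xs.length from ⟨by simp [haj], hj⟩)]
        · rw [if_neg hae, if_neg (by
            rintro ⟨hm, _⟩
            rcases List.mem_cons.mp hm with h | h
            · exact hae (by omega)
            · exact hal h)]
    · rw [if_neg (by rintro ⟨_, h⟩; exact hj h), if_neg (by rintro ⟨_, h⟩; exact hj h),
        List.getElem?_set]
      by_cases hae : a.toNat = j
      · rw [if_pos hae, if_neg (by omega : ¬ a.toNat < xs.length)]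
        exact (List.getElem?_eq_none (by omega)).symm
      · rw [if_neg hae]

theorem pvAssign_getElem? (p : List Int) (num L : Int) (h1 : 1 ≤ num) (hdvd : num ∣ L)
    (hL : 1 ≤ L) (hlen : p.length = L.toNat) (j : Nat) :
    (pvAssignSlice p (num - 1) num
        (PySem.List.pyRepeat [(1 : Int)] (PySem.Int.floordiv L num)))[j]? =
      if num ∣ (j : Int) + 1 ∧ j < p.length then some 1 else p[j]? := by
  have hpl : (p.length : Int) = L := by omega
  have hq0 : PySem.Int.floordiv L num = L / num := PySem.Int.floordiv_eq_ediv_of_pos (by omega)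
  have hmul : num * (L / num) = L := Int.mul_ediv_cancel' hdvd
  have hnL : num ≤ L := Int.le_of_dvd (by omega) hdvd
  have hidx : pvSliceIdx (p.length : Int) (num - 1) num = PySem.List.pyRange (num - 1) L num := by
    rw [pvSliceIdx, if_pos (by omega : (0:Int) < num)]
    simp only [hpl]
    rw [if_neg (by omega : ¬(num - 1 < 0)), max_eq_left (by omega)]
  have hrlen : (PySem.List.pyRange (num - 1) L num).length = (L / num).toNat := by
    rw [PySem.List.pyRange_of_pos _ _ (by omega : (0:Int) < num), if_pos (by omega : num - 1 < L)]
    rw [List.length_map, List.length_range]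
    congr 1
    congr 1
    ring
  have hvs : PySem.List.pyRepeat [(1 : Int)] (PySem.Int.floordiv L num) =
      List.replicate (L / num).toNat 1 := by
    rw [PySem.List.pyRepeat_singleton, hq0]
  rw [pvAssignSlice]
  simp only [hidx, hvs]
  rw [if_pos (by rw [hrlen, List.length_replicate]),
    pvZipRep _ _ hrlen, List.foldl_map,
    pvSetFold_getElem? _ p j (fun i hi => by
      have := (PySem.List.mem_pyRange_iff_of_pos (by omega : (0:Int) < num) i).mp hi
      omega)]
  by_cases hj : j < p.length
  · have hmem : ((j : Int) ∈ PySem.List.pyRange (num - 1) L num) ↔ num ∣ (j : Int) + 1 := by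
      rw [PySem.List.mem_pyRange_iff_of_pos (by omega : (0:Int) < num)]
      constructor
      · rintro ⟨_, _, c, hc⟩
        refine ⟨c + 1, ?_⟩
        have : num * (c + 1) = num * c + num := by ring
        omega
      · rintro ⟨c, hc⟩
        have hjlt : (j : Int) < L := by omega
        have hge : num ≤ (j : Int) + 1 := Int.le_of_dvd (by omega) ⟨c, hc⟩
        refine ⟨by omega, hjlt, c - 1, ?_⟩
        have : num * (c - 1) = num * c - num := by ring
        omega
    simp only [hmem]
  · rw [if_neg (by rintro ⟨_, h⟩; exact hj h), if_neg (by rintro ⟨_, h⟩; exact hj h)]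

theorem pvSetFoldPairs_length (pairs : List (Int × Int)) :
    ∀ xs : List Int, (pairs.foldl (fun p kv => p.set kv.1.toNat kv.2) xs).length = xs.length := by
  induction pairs with
  | nil => intro xs; rfl
  | cons a l ih => intro xs; simp only [List.foldl_cons]; rw [ih, List.length_set]

theorem pvAssign_length (p : List Int) (start step : Int) (vs : List Int) :
    (pvAssignSlice p start step vs).length = p.length := by
  rw [pvAssignSlice]
  split
  · exact pvSetFoldPairs_length _ _
  · rfl

theorem pvBFold_getElem? (rs : List Int) (L : Int) (hL : 1 ≤ L) :
    ∀ (p : List Int) (j : Nat), (∀ n ∈ rs, 1 ≤ n) → (∀ n ∈ rs, n ∣ L) → p.length = L.toNat →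
    (rs.foldl (fun p num =>
        pvAssignSlice p (num - 1) num
          (PySem.List.pyRepeat [(1 : Int)] (PySem.Int.floordiv L num))) p)[j]? =
      if (∃ n ∈ rs, n ∣ (j : Int) + 1) ∧ j < p.length then some 1 else p[j]? := by
  induction rs with
  | nil => intro p j _ _ _; simp
  | cons num t ih =>
    intro p j hpos hdvd hlen
    have hnum : 1 ≤ num := hpos num (by simp)
    simp only [List.foldl_cons]
    rw [ih _ j (fun n hn => hpos n (by simp [hn])) (fun n hn => hdvd n (by simp [hn]))
      (by rw [pvAssign_length, hlen]),
      pvAssign_length,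
      pvAssign_getElem? p num L hnum (hdvd num (by simp)) hL hlen j]
    by_cases hj : j < p.length
    · by_cases hd : num ∣ (j : Int) + 1
      · have hex : ∃ n ∈ num :: t, n ∣ (j : Int) + 1 := ⟨num, by simp, hd⟩
        by_cases ht : ∃ n ∈ t, n ∣ (j : Int) + 1
        · rw [if_pos (show (∃ n ∈ t, n ∣ (j : Int) + 1) ∧ j < p.length from ⟨ht, hj⟩),
            if_pos (show (∃ n ∈ num :: t, n ∣ (j : Int) + 1) ∧ j < p.length from ⟨hex, hj⟩)]
        · rw [if_neg (by rintro ⟨h, _⟩; exact ht h),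
            if_pos (show num ∣ (j : Int) + 1 ∧ j < p.length from ⟨hd, hj⟩),
            if_pos (show (∃ n ∈ num :: t, n ∣ (j : Int) + 1) ∧ j < p.length from ⟨hex, hj⟩)]
      · have hiff : (∃ n ∈ num :: t, n ∣ (j : Int) + 1) ↔ (∃ n ∈ t, n ∣ (j : Int) + 1) := by
          constructor
          · rintro ⟨n, hn, hnd⟩
            rcases List.mem_cons.mp hn with h' | h'
            · exact absurd (h' ▸ hnd) hd
            · exact ⟨n, h', hnd⟩
          · rintro ⟨n, hn, hnd⟩; exact ⟨n, by simp [hn], hnd⟩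
        rw [if_neg (show ¬(num ∣ (j : Int) + 1 ∧ j < p.length) from fun hc => hd hc.1)]
        simp only [hiff]
    · rw [if_neg (by rintro ⟨_, h⟩; exact hj h), if_neg (by rintro ⟨_, h⟩; exact hj h),
        if_neg (by rintro ⟨_, h⟩; exact hj h)]

-- ===== VERDICT (by name: the statement is the Claim_ definition above) =====
theorem getRemovalPattern_spec : Claim_equal_getRemovalPattern := by
  intro removals _hdom hpre
  obtain ⟨hne, hpos⟩ := hpre
  unfold Spec_getRemovalPattern getRemovalPattern getRemovalPattern_alt
  match removals, hne, hpos with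
  | h :: t, _, hpos =>
    simp only []
    obtain ⟨hL1, hLh, hLt⟩ := pvReduceLcm_facts t h (hpos h (by simp))
      (fun n hn => hpos n (by simp [hn]))
    have hdvd : ∀ n ∈ h :: t, n ∣ pvReduceLcm (h :: t) := by
      intro n hn
      rcases List.mem_cons.mp hn with rfl | hn'
      · exact hLh
      · exact hLt n hn'
    apply List.ext_getElem?
    intro j
    rw [PySem.List.pyRepeat_singleton, pvFold_getElem? (h :: t) _ j hpos,
      pvBFold_getElem? (h :: t) (pvReduceLcm (h :: t)) hL1 _ j hpos hdvd (by simp)]
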